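-- pv_equiv track=rewrite | github.com/qas-lab/quantum-circuit-chaining | benchmarks/ai_transpile/rl_trajectory/grid_search.py | generate_optimizer_combinations
-- ===== SOURCE A (Python) =====
-- import itertools
-- from typing import Any, Callable, Sequence
--
-- def generate_optimizer_combinations(
--     optimizers: Sequence[str],
--     max_length: int = 3,
--     include_single: bool = True,
-- ) -> list[list[str]]:
--     """Generate all optimizer combinations up to max_length.
--
--     Args:
--         optimizers: List of optimizer names
--         max_length: Maximum chain length
--         include_single: Whether to include single-optimizer combinations
--
--     Returns:
--         List of optimizer sequences (chains)
--     """
--     combinations: list[list[str]] = []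
--
--     start_length = 1 if include_single else 2
--     for length in range(start_length, max_length + 1):
--         # Generate all permutations with repetition
--         for combo in itertools.product(optimizers, repeat=length):
--             combinations.append(list(combo))
--
--     return combinations
-- ===== SOURCE B (Python) =====
-- def generate_optimizer_combinations(optimizers, max_length=3, include_single=True):
--     """Iterative prefix-extension build instead of itertools.product per length."""
--     start_length = 1 if include_single else 2
--     result = []
--     current = [[o] for o in optimizers]
--     for length in range(1, max_length + 1):
--         if length >= start_length:
--             result.extend(current)
--         current = [chain + [o] for chain in current for o in optimizers]
--     return result
-- ===== Notes on version B (the rewrite author's own statement) =====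
-- stated objective: alternative
-- what changed: Replaces the per-length itertools.product enumeration with an incremental generation-by-generation build that extends the previous length's chains by one optimizer on the right, emitting each generation once its length reaches start_length.
import Mathlib
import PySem

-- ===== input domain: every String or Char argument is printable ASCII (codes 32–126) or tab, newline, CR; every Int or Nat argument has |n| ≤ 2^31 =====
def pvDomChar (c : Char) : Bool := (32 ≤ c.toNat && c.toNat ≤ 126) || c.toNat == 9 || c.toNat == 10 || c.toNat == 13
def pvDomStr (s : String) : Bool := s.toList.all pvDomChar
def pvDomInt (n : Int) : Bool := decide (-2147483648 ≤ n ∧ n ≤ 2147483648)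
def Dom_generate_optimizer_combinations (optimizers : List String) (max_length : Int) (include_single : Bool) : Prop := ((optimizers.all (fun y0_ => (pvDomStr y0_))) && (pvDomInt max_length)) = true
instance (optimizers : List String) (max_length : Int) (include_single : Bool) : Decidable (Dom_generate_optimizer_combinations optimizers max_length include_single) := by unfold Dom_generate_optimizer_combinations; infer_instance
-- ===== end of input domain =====

-- B replaces A's per-length itertools.product enumeration with an incremental
-- generation-by-generation build (each generation = previous chains extended by one
-- optimizer on the right); same values, same order (alternative decomposition).

-- ===== PORT A =====
-- itertools.product(opts, repeat=n), exact tuple order (leftmost coordinate varies slowest)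
def pyProductRep (opts : List String) : Nat → List (List String)
  | 0 => [[]]
  | n + 1 => opts.flatMap (fun o => (pyProductRep opts n).map (fun rest => o :: rest))

def generate_optimizer_combinations (optimizers : List String) (max_length : Int) (include_single : Bool) : List (List String) :=
  let start_length : Int := if include_single then 1 else 2
  (PySem.List.pyRange start_length (max_length + 1) 1).foldl
    (fun combinations length =>
      (pyProductRep optimizers length.toNat).foldl
        (fun acc combo => acc ++ [combo]) combinations)
    []

-- ===== PORT B =====
def generate_optimizer_combinations_alt (optimizers : List String) (max_length : Int) (include_single : Bool) : List (List String) :=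
  let start_length : Int := if include_single then 1 else 2
  let st := (PySem.List.pyRange 1 (max_length + 1) 1).foldl
    (fun (st : List (List String) × List (List String)) length =>
      (if start_length ≤ length then st.1 ++ st.2 else st.1,
       st.2.flatMap (fun chain => optimizers.map (fun o => chain ++ [o]))))
    ([], optimizers.map (fun o => [o]))
  st.1

-- ===== PRECONDITION & SPEC =====
def Spec_generate_optimizer_combinations (optimizers : List String) (max_length : Int) (include_single : Bool) (out : List (List String)) : Prop := out = generate_optimizer_combinations_alt optimizers max_length include_single
instance (optimizers : List String) (max_length : Int) (include_single : Bool) (out : List (List String)) : Decidable (Spec_generate_optimizer_combinations optimizers max_length include_single out) := by unfold Spec_generate_optimizer_combinations; infer_instance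

-- ===== CLAIM (what is proved, stated in full; the proofs are below) =====
def Claim_equal_generate_optimizer_combinations : Prop := ∀ (optimizers : List String) (max_length : Int) (include_single : Bool), Dom_generate_optimizer_combinations optimizers max_length include_single → Spec_generate_optimizer_combinations optimizers max_length include_single (generate_optimizer_combinations optimizers max_length include_single)

-- ===== LEMMAS AND PROOFS =====

theorem flatMap_box (opts : List String) :
    opts.flatMap (fun o => [[o]]) = opts.map (fun o => [o]) := by
  induction opts <;> simp_all

-- right-extension of the n-tuples gives the (n+1)-tuples
theorem pyProductRep_snoc (opts : List String) (n : Nat) :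
    pyProductRep opts (n + 1) =
      (pyProductRep opts n).flatMap (fun c => opts.map (fun o => c ++ [o])) := by
  induction n with
  | zero => simp [pyProductRep, flatMap_box]
  | succ n ih =>
    conv_lhs => rw [pyProductRep, ih]
    rw [pyProductRep]
    simp [List.map_flatMap, List.flatMap_assoc, List.flatMap_map, List.map_map,
      Function.comp_def, List.cons_append]

-- the abstract result: all tuples of lengths start..m in order
def allChains (opts : List String) (start m : Int) : List (List String) :=
  (PySem.List.pyRange start (m + 1) 1).flatMap (fun len => pyProductRep opts len.toNat)

theorem portA_eq (opts : List String) (m : Int) (inc : Bool) :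
    generate_optimizer_combinations opts m inc =
      allChains opts (if inc then 1 else 2) m := by
  unfold generate_optimizer_combinations allChains
  simp only [PySem.List.foldl_append_singleton_eq_self]
  rw [PySem.List.foldl_append_eq_flatMap]
  simp

theorem allChains_step (opts : List String) (start : Int) (k : Nat) :
    allChains opts start ((k : Int) + 1) =
      if start ≤ (k : Int) + 1 then allChains opts start (k : Int) ++ pyProductRep opts (k + 1)
      else allChains opts start (k : Int) := by
  unfold allChains
  by_cases h : start ≤ (k : Int) + 1
  · rw [if_pos h, PySem.List.pyRange_one_succ_right h, List.flatMap_append]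
    simp [show ((k : Int) + 1).toNat = k + 1 from by omega]
  · rw [if_neg h, PySem.List.pyRange_one_eq_nil (by omega),
        PySem.List.pyRange_one_eq_nil (by omega)]

theorem altLoop_state (opts : List String) (start : Int) (hs : 1 ≤ start) (k : Nat) :
    (PySem.List.pyRange 1 ((k : Int) + 1) 1).foldl
      (fun (st : List (List String) × List (List String)) length =>
        (if start ≤ length then st.1 ++ st.2 else st.1,
         st.2.flatMap (fun chain => opts.map (fun o => chain ++ [o]))))
      ([], opts.map (fun o => [o]))
    = (allChains opts start (k : Int), pyProductRep opts (k + 1)) := by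
  induction k with
  | zero =>
    rw [PySem.List.pyRange_one_eq_nil (by norm_num)]
    unfold allChains
    rw [PySem.List.pyRange_one_eq_nil (by omega)]
    simp [pyProductRep, flatMap_box]
  | succ k ih =>
    have h1 : (1 : Int) ≤ (k : Int) + 1 := by omega
    rw [show ((k + 1 : Nat) : Int) + 1 = ((k : Int) + 1) + 1 by push_cast; ring,
        PySem.List.pyRange_one_succ_right h1, List.foldl_append, ih]
    simp only [List.foldl_cons, List.foldl_nil]
    push_cast
    rw [Prod.mk.injEq]
    constructor
    · rw [allChains_step]
    · rw [← pyProductRep_snoc]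

theorem portB_eq (opts : List String) (m : Int) (inc : Bool) :
    generate_optimizer_combinations_alt opts m inc =
      allChains opts (if inc then 1 else 2) m := by
  unfold generate_optimizer_combinations_alt
  set start : Int := if inc then 1 else 2 with hstart
  have hs : 1 ≤ start := by rw [hstart]; split <;> norm_num
  by_cases hm : m ≤ 0
  · rw [PySem.List.pyRange_one_eq_nil (by omega)]
    unfold allChains
    rw [PySem.List.pyRange_one_eq_nil (by omega)]
    simp
  · have : m = ((m.toNat : Int)) := by omega
    rw [this]
    dsimp only
    rw [altLoop_state opts start hs m.toNat]

-- ===== VERDICT (by name: the statement is the Claim_ definition above) =====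
theorem generate_optimizer_combinations_spec : Claim_equal_generate_optimizer_combinations := by
  intro opts m inc _
  unfold Spec_generate_optimizer_combinations
  rw [portA_eq, portB_eq]
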